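-- pv_equiv track=rewrite | github.com/pypi-data/pypi-mirror-176 | packages/ParserLexicalAnalyzer/ParserLexicalAnalyzer-1.1.1-py3-none-any.whl/ParserLexicalAnalyzer/PropertyParser/LexicalAnalyzer.py | isBooleanOperator
-- ===== SOURCE A (Python) =====
-- def isBooleanOperator(string):
--     st = 0
--     for i in range(0, len(string)):
--         if st == 0:
--             if string[i] == "=":
--                 st = 1
--             elif string[i] == "&" or string[i] == "|":
--                 st = 2
--             else:
--                 return False
--         elif st == 1:
--             if string[i] == ">":
--                 st = 2
--             else:
--                 return False
--         elif st == 2: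
--             return True
--     return False
-- ===== SOURCE B (Python) =====
-- def isBooleanOperator(string):
--     if not string:
--         return False
--     c = string[0]
--     if c == "&" or c == "|":
--         return len(string) >= 2
--     if c == "=":
--         return len(string) >= 3 and string[1] == ">"
--     return False
-- ===== Notes on version B (the rewrite author's own statement) =====
-- stated objective: simpler
-- what changed: Replaced the state-machine loop over all characters with a direct closed-form check of the first two characters and the length.
import Mathlib
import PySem

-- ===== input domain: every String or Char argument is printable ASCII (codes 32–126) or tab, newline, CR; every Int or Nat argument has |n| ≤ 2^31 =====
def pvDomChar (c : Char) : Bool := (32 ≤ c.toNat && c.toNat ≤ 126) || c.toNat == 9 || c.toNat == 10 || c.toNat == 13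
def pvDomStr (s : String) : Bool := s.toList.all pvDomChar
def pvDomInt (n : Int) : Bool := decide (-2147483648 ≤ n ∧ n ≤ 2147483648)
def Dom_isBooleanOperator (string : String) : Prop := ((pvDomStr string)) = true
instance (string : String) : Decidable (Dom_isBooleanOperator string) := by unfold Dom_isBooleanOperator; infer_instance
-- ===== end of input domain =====

-- B replaces A's state-machine loop with a closed-form check of the first two characters and the length (objective: simpler).

-- ===== PORT A =====
-- literal transliteration of A's loop: state st ∈ {0,1,2}, early returns as in the Python
def isBooleanOperatorLoop : List Char → Nat → Bool
  | [], _ => false                                  -- loop ends, final `return False`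
  | c :: rest, st =>
    if st = 0 then
      if c = '=' then isBooleanOperatorLoop rest 1
      else if c = '&' ∨ c = '|' then isBooleanOperatorLoop rest 2
      else false
    else if st = 1 then
      if c = '>' then isBooleanOperatorLoop rest 2
      else false
    else true                                       -- st == 2: return True

def isBooleanOperator (string : String) : Bool :=
  isBooleanOperatorLoop string.toList 0

-- ===== PORT B =====
def isBooleanOperator_alt (string : String) : Bool :=
  match string.toList with
  | [] => false
  | c :: rest =>
    if c = '&' ∨ c = '|' then decide (1 + rest.length ≥ 2)
    else if c = '=' then decide (1 + rest.length ≥ 3) && decide (rest.head? = some '>')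
    else false

-- ===== PRECONDITION & SPEC =====
def Spec_isBooleanOperator (string : String) (out : Bool) : Prop := out = isBooleanOperator_alt string
instance (string : String) (out : Bool) : Decidable (Spec_isBooleanOperator string out) := by unfold Spec_isBooleanOperator; infer_instance

-- ===== CLAIM (what is proved, stated in full; the proofs are below) =====
def Claim_equal_isBooleanOperator : Prop := ∀ (string : String), Dom_isBooleanOperator string → Spec_isBooleanOperator string (isBooleanOperator string)

-- ===== LEMMAS AND PROOFS =====
theorem loop_state2 (l : List Char) : isBooleanOperatorLoop l 2 = !l.isEmpty := by
  cases l <;> simp [isBooleanOperatorLoop]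

theorem loop_state1 (l : List Char) :
    isBooleanOperatorLoop l 1 =
      match l with
      | [] => false
      | c :: rest => if c = '>' then !rest.isEmpty else false := by
  cases l with
  | nil => simp [isBooleanOperatorLoop]
  | cons c rest => simp [isBooleanOperatorLoop, loop_state2]

-- ===== VERDICT (by name: the statement is the Claim_ definition above) =====
theorem isBooleanOperator_spec : Claim_equal_isBooleanOperator := by
  intro s _
  unfold Spec_isBooleanOperator isBooleanOperator isBooleanOperator_alt
  cases h : s.toList with
  | nil => simp [isBooleanOperatorLoop]
  | cons c rest =>
    simp only [isBooleanOperatorLoop]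
    by_cases he : c = '='
    · subst he
      simp only [loop_state1]
      cases rest with
      | nil => simp
      | cons d r =>
        by_cases hd : d = '>'
        · subst hd; cases r <;> simp [List.isEmpty] <;> try omega
        · simp [hd, List.head?]
    · by_cases ho : c = '&' ∨ c = '|'
      · have hne : ¬ (c = '=') := he
        simp [hne, ho, loop_state2]
        cases rest <;> simp [List.isEmpty] <;> omega
      · simp [he, ho]
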